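-- pv_equiv track=rewrite | github.com/zaptot/Algorithms-1 | palindrome/Palindrome.py | createLength
-- ===== SOURCE A (Python) =====
-- def createLength(string):
--     length=[[0 for _ in range(len(string))] for _ in range(len(string))]
--     for i in range (len(string)):
--         for j in range (len(string)):
--             if i == j:
--                 length[i][j]=1
--             else:
--                 if i<j:
--                     length[i][j]=-1
--                 else:
--                     length[i][j]=0
--     return length
-- ===== SOURCE B (Python) =====
-- def createLength(string):
--     n = len(string)
--     result = []
--     row = [1] + [-1] * (n - 1)
--     for _ in range(n):
--         result.append(row)
--         row = [0] + row[:-1]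
--     return result
-- ===== Notes on version B (the rewrite author's own statement) =====
-- stated objective: alternative
-- what changed: A single rolling row is maintained: starting from the first row [1]+[-1]*(n-1), each next row is derived from the previous one by prepending 0 and dropping the last cell, so no per-cell i/j comparisons or prebuilt zero matrix are needed.
import Mathlib
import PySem

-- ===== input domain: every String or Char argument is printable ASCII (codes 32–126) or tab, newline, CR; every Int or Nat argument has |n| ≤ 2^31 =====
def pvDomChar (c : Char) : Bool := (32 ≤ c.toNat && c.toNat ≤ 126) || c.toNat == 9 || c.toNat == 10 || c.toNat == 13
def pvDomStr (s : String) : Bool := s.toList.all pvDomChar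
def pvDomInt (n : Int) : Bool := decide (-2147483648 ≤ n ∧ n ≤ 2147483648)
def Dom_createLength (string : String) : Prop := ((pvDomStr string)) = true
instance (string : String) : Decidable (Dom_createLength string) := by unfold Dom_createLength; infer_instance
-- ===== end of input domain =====

-- B maintains one rolling row (start [1]+[-1]*(n-1); each next row = prepend 0, drop the last cell)
-- instead of A's prebuilt zero matrix mutated by nested i/j loops with per-cell comparisons.
-- Python lists mutated/appended in place are ported as Array (O(1) mutation, like Python);
-- the returned matrix is converted to List (List Int) per the type convention.

-- ===== PORT A =====
-- A: prebuild an n×n zero matrix, then for each i, for each j, assign 1 / -1 / 0 by comparing i and j.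
def createLength (string : String) : List (List Int) :=
  let n := string.toList.length
  let length0 : Array (Array Int) :=
    ((List.range n).map (fun _ => ((List.range n).map (fun _ => (0 : Int))).toArray)).toArray
  (((List.range n).foldl
    (fun M i =>
      (List.range n).foldl
        (fun M j =>
          M.modify i (fun row => row.setIfInBounds j (if i = j then 1 else if i < j then -1 else 0)))
        M)
    length0).toList.map Array.toList)

-- ===== PORT B =====
-- B: append the current row, then derive the next as 0 :: row.dropLast (Python's [0] + row[:-1];
-- dropLast is exact for row[:-1] on lists, Array.push for result.append).
def createLength_alt (string : String) : List (List Int) :=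
  let n := string.toList.length
  (((List.range n).foldl
    (fun (st : Array (List Int) × List Int) _ => (st.1.push st.2, 0 :: st.2.dropLast))
    (([] : List (List Int)).toArray, 1 :: List.replicate (n - 1) (-1 : Int))).1).toList

-- ===== PRECONDITION & SPEC =====
def Spec_createLength (string : String) (out : List (List Int)) : Prop := out = createLength_alt string
instance (string : String) (out : List (List Int)) : Decidable (Spec_createLength string out) := by unfold Spec_createLength; infer_instance

-- ===== CLAIM (what is proved, stated in full; the proofs are below) =====
def Claim_equal_createLength : Prop := ∀ (string : String), Dom_createLength string → Spec_createLength string (createLength string)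

-- ===== LEMMAS AND PROOFS =====

/-- The cell value A assigns at (i, j). -/
def pvG (i j : Nat) : Int := if i = j then 1 else if i < j then -1 else 0

/-- The intended row i of the n×n matrix. -/
def pvRow (n i : Nat) : List Int :=
  List.replicate i (0 : Int) ++ [1] ++ List.replicate (n - i - 1) (-1 : Int)

/-- A's inner loop on a single row, abstracted. -/
def pvRowFold (n i : Nat) (row : Array Int) : Array Int :=
  (List.range n).foldl (fun r j => r.setIfInBounds j (pvG i j)) row

lemma pvRowFold_size (n i : Nat) (row : Array Int) : (pvRowFold n i row).size = row.size := by
  induction n with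
  | zero => simp [pvRowFold]
  | succ m ih => simp [pvRowFold, List.range_succ, List.foldl_append] at *; simp [ih]

lemma pvRowFold_getElem? (n i : Nat) (row : Array Int) (j : Nat) :
    (pvRowFold n i row)[j]? = if j < n ∧ j < row.size then some (pvG i j) else row[j]? := by
  induction n with
  | zero => simp [pvRowFold]
  | succ m ih =>
    have hsz : (pvRowFold m i row).size = row.size := pvRowFold_size m i row
    simp only [pvRowFold, List.range_succ, List.foldl_append, List.foldl_cons, List.foldl_nil]
    rw [show ((List.range m).foldl (fun r j => r.setIfInBounds j (pvG i j)) row) = pvRowFold m i row from rfl]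
    rw [Array.getElem?_setIfInBounds, hsz]
    by_cases hmj : m = j
    · subst hmj
      by_cases hj : m < row.size
      · simp [hj]
      · simp [hj, ih]
    · rw [if_neg hmj, ih]
      split_ifs <;> first | rfl | omega

/-- A's inner loop over j, acting on the matrix: it only rewrites row i. -/
def pvInner (n i : Nat) (M : Array (Array Int)) : Array (Array Int) :=
  (List.range n).foldl
    (fun M j => M.modify i (fun row => row.setIfInBounds j (pvG i j))) M

lemma pvInner_getElem? (n i : Nat) (M : Array (Array Int)) (k : Nat) :
    (pvInner n i M)[k]? = if i = k then (pvRowFold n i) <$> M[k]? else M[k]? := by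
  induction n with
  | zero =>
    simp only [pvInner, List.range_zero, List.foldl_nil]
    by_cases h : i = k
    · cases hk : M[k]? <;> simp [h, pvRowFold, hk]
    · simp [h]
  | succ m ih =>
    simp only [pvInner, List.range_succ, List.foldl_append, List.foldl_cons, List.foldl_nil]
    rw [show ((List.range m).foldl (fun M j => M.modify i (fun row => row.setIfInBounds j (pvG i j))) M)
        = pvInner m i M from rfl]
    rw [Array.getElem?_modify, ih]
    by_cases h : i = k
    · subst h
      cases hk : M[i]? <;> simp [pvRowFold, List.range_succ, List.foldl_append]
    · simp [h]

/-- A's outer loop over the first m rows. -/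
def pvOuter (n m : Nat) (M : Array (Array Int)) : Array (Array Int) :=
  (List.range m).foldl (fun M i => pvInner n i M) M

lemma pvOuter_getElem? (n m : Nat) (M : Array (Array Int)) (k : Nat) :
    (pvOuter n m M)[k]? = if k < m then (pvRowFold n k) <$> M[k]? else M[k]? := by
  induction m with
  | zero => simp [pvOuter]
  | succ m ih =>
    simp only [pvOuter, List.range_succ, List.foldl_append, List.foldl_cons, List.foldl_nil]
    rw [show ((List.range m).foldl (fun M i => pvInner n i M) M) = pvOuter n m M from rfl]
    rw [pvInner_getElem?, ih]
    rcases Nat.lt_trichotomy k m with h | h | h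
    · rw [if_neg (by omega : ¬ m = k), if_pos h, if_pos (by omega)]
    · rw [if_pos h.symm, if_neg (by omega : ¬ k < m), if_pos (by omega), h]
    · rw [if_neg (by omega : ¬ m = k), if_neg (by omega : ¬ k < m), if_neg (by omega : ¬ k < m + 1)]

/-- A's rewritten zero row equals pvRow, for i < n. -/
lemma pvRow_eq (n i : Nat) (hi : i < n) :
    (pvRowFold n i ((List.range n).map (fun _ => (0 : Int))).toArray).toList = pvRow n i := by
  apply List.ext_getElem?
  intro j
  rw [Array.getElem?_toList, pvRowFold_getElem?]
  simp only [List.size_toArray, List.length_map, List.length_range, List.getElem?_toArray]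
  by_cases hj : j < n
  · rw [if_pos ⟨hj, hj⟩]
    unfold pvRow
    rcases Nat.lt_trichotomy j i with h | h | h
    · rw [List.getElem?_append_left (by simp; omega), List.getElem?_append_left (by simp [h]),
        List.getElem?_replicate, if_pos h]
      simp only [pvG]
      rw [if_neg (by omega : ¬ i = j), if_neg (by omega : ¬ i < j)]
    · subst h
      rw [List.getElem?_append_left (by simp), List.getElem?_append_right (by simp)]
      simp [pvG]
    · rw [List.getElem?_append_right (by simp; omega)]
      simp only [List.length_append, List.length_replicate, List.length_cons, List.length_nil,
        List.getElem?_replicate]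
      rw [if_pos (by omega)]
      simp only [pvG]
      rw [if_neg (by omega : ¬ i = j), if_pos h]
  · rw [if_neg (by omega)]
    rw [List.getElem?_eq_none (by simp; omega),
        List.getElem?_eq_none (by simp [pvRow, List.length_append]; omega)]

/-- B's fold unrolled to a map of iterates of the rolling step. -/
lemma pvFold_roll (m : Nat) (acc : List (List Int)) (r : List Int) :
    (List.range m).foldl (fun (st : Array (List Int) × List Int) _ => (st.1.push st.2, 0 :: st.2.dropLast))
      (acc.toArray, r)
      = ((acc ++ (List.range m).map (fun i => (fun r : List Int => 0 :: r.dropLast)^[i] r)).toArray,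
         (fun r : List Int => 0 :: r.dropLast)^[m] r) := by
  induction m with
  | zero => simp
  | succ m ih =>
    simp only [List.range_succ, List.foldl_append, List.foldl_cons, List.foldl_nil, ih,
      List.push_toArray, List.map_append, List.map_cons, List.map_nil, List.append_assoc,
      Function.iterate_succ_apply']

/-- The rolling step applied i times to the first row yields pvRow n i, for i < n. -/
lemma pvIterate_row (n i : Nat) (hi : i < n) :
    (fun r : List Int => 0 :: r.dropLast)^[i] (1 :: List.replicate (n - 1) (-1 : Int)) = pvRow n i := by
  induction i with
  | zero => simp [pvRow]
  | succ i ih =>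
    rw [Function.iterate_succ_apply', ih (by omega)]
    unfold pvRow
    have h1 : n - i - 1 = (n - (i + 1) - 1) + 1 := by omega
    rw [h1, List.replicate_succ']
    rw [show List.replicate i (0 : Int) ++ [1] ++ (List.replicate (n - (i + 1) - 1) (-1 : Int) ++ [-1])
        = (List.replicate i (0 : Int) ++ [1] ++ List.replicate (n - (i + 1) - 1) (-1 : Int)) ++ [-1] by
      simp]
    rw [List.dropLast_concat]
    simp [List.replicate_succ]

-- ===== VERDICT (by name: the statement is the Claim_ definition above) =====
theorem createLength_spec : Claim_equal_createLength := by
  intro s _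
  unfold Spec_createLength createLength createLength_alt
  dsimp only
  set n := s.toList.length with hn
  rw [pvFold_roll]
  rw [show ((List.range n).foldl
      (fun M i => (List.range n).foldl
        (fun M j => M.modify i (fun row => row.setIfInBounds j (if i = j then 1 else if i < j then -1 else 0))) M)
      (((List.range n).map (fun _ => ((List.range n).map (fun _ => (0 : Int))).toArray)).toArray))
      = pvOuter n n (((List.range n).map (fun _ => ((List.range n).map (fun _ => (0 : Int))).toArray)).toArray) from rfl]
  apply List.ext_getElem?
  intro k
  rw [List.getElem?_map, Array.getElem?_toList, pvOuter_getElem?]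
  simp only [List.toList_toArray, List.nil_append, List.getElem?_toArray, List.getElem?_map,
    List.getElem?_range', Option.map_map]
  by_cases hk : k < n
  · rw [if_pos hk]
    rw [List.getElem?_range hk]
    simp only [Option.map_eq_map, Option.map_some]
    exact congrArg some ((pvRow_eq n k hk).trans (pvIterate_row n k hk).symm)
  · rw [if_neg hk]
    rw [List.getElem?_eq_none (by simp; omega : (List.range n).length ≤ k)]
    simp
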